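-- pv_equiv track=rewrite | github.com/Subaru-PFS-GA/ga_pfsspec_core | python/pfs/ga/pfsspec/core/util/argumentparser.py | _get_config_paths
-- ===== SOURCE A (Python) =====
-- def _get_config_paths(arg_strings):
--     """
--     Find --config in arg_strings
--     """
--     paths = None
--     for i, arg in enumerate(arg_strings):
--         if paths is not None and arg[0] == '-':
--             # Stop if new option after --config is found
--             break
--         elif arg == '--config':
--             paths = []
--         elif paths is not None:
--             paths.append(arg)
--
--     return { 'config': paths }
-- ===== SOURCE B (Python) =====
-- def _get_config_paths(arg_strings):
--     """
--     Find --config in arg_strings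
--     """
--     if '--config' not in arg_strings:
--         return {'config': None}
--     tail = arg_strings[arg_strings.index('--config') + 1:]
--     paths = []
--     for a in tail:
--         if a[0] == '-':
--             break
--         paths.append(a)
--     return {'config': paths}
-- ===== Notes on version B (the rewrite author's own statement) =====
-- stated objective: simpler
-- what changed: Replaces A's single stateful sweep with an Optional accumulator by an explicit locate step (membership test + index), a slice of the tail, and a plain prefix-collecting loop over only the tail.
import Mathlib
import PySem

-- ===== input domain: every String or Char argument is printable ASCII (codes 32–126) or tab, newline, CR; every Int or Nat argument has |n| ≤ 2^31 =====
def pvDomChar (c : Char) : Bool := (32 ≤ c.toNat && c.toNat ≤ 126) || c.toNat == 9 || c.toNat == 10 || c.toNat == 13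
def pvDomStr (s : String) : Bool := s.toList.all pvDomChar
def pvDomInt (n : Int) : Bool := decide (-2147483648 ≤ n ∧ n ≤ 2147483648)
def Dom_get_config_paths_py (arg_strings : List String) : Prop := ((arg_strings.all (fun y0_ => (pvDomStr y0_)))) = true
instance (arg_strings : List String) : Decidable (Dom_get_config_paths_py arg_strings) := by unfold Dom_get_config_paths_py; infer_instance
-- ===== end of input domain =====

-- B replaces A's single stateful sweep (Optional accumulator, break) by locate-the-marker
-- (membership + index), a slice of the tail, and a prefix-collecting loop over only the tail: simpler.

-- ===== PORT A =====
-- the for-loop of A: state is 'paths : Option (List String)'; returning the state = 'break'/end of list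
def pvA_loop : List String → Option (List String) → Option (List String)
  | [], paths => paths
  | arg :: rest, paths =>
    if paths.isSome ∧ PySem.Str.pyGet? arg 0 = some '-' then paths   -- break
    else if arg = "--config" then pvA_loop rest (some [])
    else if paths.isSome then pvA_loop rest (paths.map (· ++ [arg]))
    else pvA_loop rest paths

def get_config_paths_py (arg_strings : List String) : List (String × Option (List String)) :=
  [("config", pvA_loop arg_strings none)]

-- ===== PORT B =====
-- the for-loop of Source B over the tail: collect until an arg starting with '-', then break
def pvB_loop : List String → List String → List String
  | [], paths => paths
  | a :: rest, paths =>
    if PySem.Str.pyGet? a 0 = some '-' then paths                   -- break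
    else pvB_loop rest (paths ++ [a])

def get_config_paths_py_alt (arg_strings : List String) : List (String × Option (List String)) :=
  if "--config" ∈ arg_strings then
    let tail := PySem.List.slice arg_strings
      (some ((((PySem.List.index? arg_strings "--config").getD 0 + 1 : Nat)) : Int)) none
    [("config", some (pvB_loop tail []))]
  else [("config", none)]

-- ===== PRECONDITION & SPEC =====
-- Both Pythons raise IndexError ('' has no first character) when an empty string occurs after the
-- first '--config' and before the next argument starting with '-'; Pre_ excludes exactly those inputs.
def Pre_get_config_paths_py (arg_strings : List String) : Prop :=
  "--config" ∈ arg_strings →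
    "" ∉ (arg_strings.drop ((PySem.List.index? arg_strings "--config").getD 0 + 1)).takeWhile
          (fun a => PySem.Str.pyGet? a 0 != some '-')
instance (arg_strings : List String) : Decidable (Pre_get_config_paths_py arg_strings) := by
  unfold Pre_get_config_paths_py; infer_instance

def pvWitness_get_config_paths_py : List String := ["-v", "--config", "p.json", "q.json", "-x", ""]

def Spec_get_config_paths_py (arg_strings : List String) (out : List (String × Option (List String))) : Prop := out = get_config_paths_py_alt arg_strings
instance (arg_strings : List String) (out : List (String × Option (List String))) : Decidable (Spec_get_config_paths_py arg_strings out) := by unfold Spec_get_config_paths_py; infer_instance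

-- ===== CLAIM (what is proved, stated in full; the proofs are below) =====
def Claim_equal_get_config_paths_py : Prop := ∀ (arg_strings : List String), Dom_get_config_paths_py arg_strings → Pre_get_config_paths_py arg_strings → Spec_get_config_paths_py arg_strings (get_config_paths_py arg_strings)

-- ===== LEMMAS AND PROOFS =====

-- once A's state is 'some ps', A's loop is exactly B's prefix-collecting loop
lemma pvA_loop_some (t : List String) : ∀ ps, pvA_loop t (some ps) = some (pvB_loop t ps) := by
  induction t with
  | nil => intro ps; rfl
  | cons a rest ih =>
    intro ps
    by_cases h : PySem.List.pyGet? a.toList 0 = some '-'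
    · simp [pvA_loop, pvB_loop, PySem.Str.pyGet?, h]
    · have hne : a ≠ "--config" := by
        intro he; subst he; exact h (by decide)
      simp [pvA_loop, pvB_loop, PySem.Str.pyGet?, h, hne, ih]

-- A's loop from the initial 'none' state = B's locate-then-collect result
lemma pvA_loop_none (args : List String) :
    pvA_loop args none =
      if "--config" ∈ args then
        some (pvB_loop (args.drop ((PySem.List.index? args "--config").getD 0 + 1)) [])
      else none := by
  induction args with
  | nil => rfl
  | cons a rest ih =>
    by_cases hc : a = "--config"
    · subst hc
      have h1 : pvA_loop ("--config" :: rest) none = pvA_loop rest (some []) := by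
        simp [pvA_loop]
      rw [h1, pvA_loop_some, PySem.List.index?_cons_self]
      simp
    · have : pvA_loop (a :: rest) none = pvA_loop rest none := by
        simp [pvA_loop, hc]
      rw [this, ih]
      rw [PySem.List.index?_cons_of_ne rest hc]
      by_cases hm : "--config" ∈ rest
      · rcases h2 : List.idxOf? "--config" rest with _ | i
        · rw [List.idxOf?_eq_none_iff] at h2; exact absurd hm h2
        · simp [hm, h2]
      · simp [hm]
        exact fun h => hc h.symm

-- ===== VERDICT (by name: the statement is the Claim_ definition above) =====
theorem get_config_paths_py_spec : Claim_equal_get_config_paths_py := by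
  intro args _ _
  unfold Spec_get_config_paths_py get_config_paths_py get_config_paths_py_alt
  rw [pvA_loop_none]
  by_cases hm : "--config" ∈ args
  · simp only [hm, if_true]
    rw [PySem.List.slice_from_natCast]
  · simp [hm]
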